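-- pv_equiv track=rewrite | github.com/Geontech/vrtgen | cpp/python/vrtgen/backend/cpp/jinja.py | do_namespace
-- ===== SOURCE A (Python) =====
-- def do_namespace(text, namespace):
--     """
--     Jinja filter to add a C++ namespace around a block of text.
--     """
--     if not namespace:
--         return text
--     def apply_namespace(text, namespace):
--         indent = ' '*4
--         prefix = ''
--         for segment in namespace.split('::'):
--             yield prefix + 'namespace ' + segment + '{'
--             prefix += indent
--         for line in text.splitlines():
--             yield prefix + line
--         for segment in namespace.split('::'):
--             prefix = prefix[:-len(indent)]
--             yield prefix + '}'
--     return '\n'.join(apply_namespace(text, namespace))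
-- ===== SOURCE B (Python) =====
-- def do_namespace(text, namespace):
--     """Wrap text in nested C++ namespaces (recursive nesting instead of three flat passes)."""
--     if not namespace:
--         return text
--     def wrap(segs, lines):
--         if not segs:
--             return lines
--         return (['namespace ' + segs[0] + '{']
--                 + ['    ' + l for l in wrap(segs[1:], lines)]
--                 + ['}'])
--     return '\n'.join(wrap(namespace.split('::'), text.splitlines()))
-- ===== Notes on version B (the rewrite author's own statement) =====
-- stated objective: alternative
-- what changed: Replaced the three flat generator passes with a shared mutable prefix by a recursive helper that wraps the inner block one namespace level at a time, indenting the whole inner result.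
import Mathlib
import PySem

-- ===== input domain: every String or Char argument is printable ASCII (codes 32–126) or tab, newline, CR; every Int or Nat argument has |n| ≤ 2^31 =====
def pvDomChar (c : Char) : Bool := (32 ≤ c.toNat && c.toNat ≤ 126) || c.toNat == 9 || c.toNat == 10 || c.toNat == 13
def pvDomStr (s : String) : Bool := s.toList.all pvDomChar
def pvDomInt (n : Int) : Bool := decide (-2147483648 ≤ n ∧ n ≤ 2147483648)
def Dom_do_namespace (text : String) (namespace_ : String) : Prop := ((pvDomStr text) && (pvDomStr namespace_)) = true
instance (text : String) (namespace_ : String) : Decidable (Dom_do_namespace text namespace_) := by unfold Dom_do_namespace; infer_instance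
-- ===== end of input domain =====

-- B restructures A's three flat generator passes (mutable prefix) into a recursive per-level wrap; same output, same cost.

-- ===== PORT A =====
def do_namespace (text : String) (namespace_ : String) : String :=
  if namespace_ = "" then text else
  let segs := PySem.Chars.splitOn namespace_.toList "::".toList
  let lines := PySem.Chars.splitlines text.toList
  -- first loop: yield prefix + 'namespace ' + segment + '{'; prefix += indent
  let s1 := segs.foldl (fun (st : List (List Char) × List Char) seg =>
      (st.1 ++ [st.2 ++ "namespace ".toList ++ seg ++ ['{']], st.2 ++ "    ".toList)) ([], [])
  -- second loop: yield prefix + line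
  let s2 := lines.foldl (fun (acc : List (List Char)) line => acc ++ [s1.2 ++ line]) s1.1
  -- third loop: prefix = prefix[:-len(indent)]; yield prefix + '}'
  -- (prefix[:-4] ported as take (length - 4): exact, including a prefix shorter than 4)
  let s3 := segs.foldl (fun (st : List (List Char) × List Char) _ =>
      let p := st.2.take (st.2.length - 4)
      (st.1 ++ [p ++ ['}']], p)) (s2, s1.2)
  String.ofList (PySem.Chars.join ['\n'] s3.1)

-- ===== PORT B =====
def wrapRec (segs : List (List Char)) (lines : List (List Char)) : List (List Char) :=
  match segs with
  | [] => lines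
  | s :: rest =>
      ("namespace ".toList ++ s ++ ['{'])
        :: ((wrapRec rest lines).map (fun l => "    ".toList ++ l) ++ [['}']])

def do_namespace_alt (text : String) (namespace_ : String) : String :=
  if namespace_ = "" then text else
  String.ofList (PySem.Chars.join ['\n']
    (wrapRec (PySem.Chars.splitOn namespace_.toList "::".toList)
             (PySem.Chars.splitlines text.toList)))

-- ===== PRECONDITION & SPEC =====
def Spec_do_namespace (text : String) (namespace_ : String) (out : String) : Prop := out = do_namespace_alt text namespace_
instance (text : String) (namespace_ : String) (out : String) : Decidable (Spec_do_namespace text namespace_ out) := by unfold Spec_do_namespace; infer_instance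

-- ===== CLAIM (what is proved, stated in full; the proofs are below) =====
def Claim_equal_do_namespace : Prop := ∀ (text : String) (namespace_ : String), Dom_do_namespace text namespace_ → Spec_do_namespace text namespace_ (do_namespace text namespace_)

-- ===== LEMMAS AND PROOFS =====

-- k levels of indentation
def ind (k : Nat) : List Char := List.replicate (4 * k) ' '

-- closed form of A's first loop output
def opensL (k : Nat) : List (List Char) → List (List Char)
  | [] => []
  | s :: r => (ind k ++ "namespace ".toList ++ s ++ ['{']) :: opensL (k + 1) r

-- closed form of A's third loop output, written top-down
def closesL (k : Nat) : List (List Char) → List (List Char)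
  | [] => []
  | _ :: r => closesL (k + 1) r ++ [ind k ++ ['}']]

theorem ind_append (k : Nat) : ind k ++ "    ".toList = ind (k + 1) := by
  have h4 : "    ".toList = List.replicate 4 ' ' := by decide
  rw [ind, ind, h4, ← List.replicate_add]
  congr 1

theorem ind_pop (k : Nat) : (ind (k + 1)).take ((ind (k + 1)).length - 4) = ind k := by
  simp [ind, List.take_replicate, Nat.mul_add]

theorem fold1_eq (segs : List (List Char)) :
    ∀ (k : Nat) (acc : List (List Char)),
    segs.foldl (fun (st : List (List Char) × List Char) seg =>
      (st.1 ++ [st.2 ++ "namespace ".toList ++ seg ++ ['{']], st.2 ++ "    ".toList)) (acc, ind k)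
    = (acc ++ opensL k segs, ind (k + segs.length)) := by
  induction segs with
  | nil => intro k acc; simp [opensL]
  | cons s r ih =>
      intro k acc
      simp only [List.foldl_cons, ind_append]
      rw [ih (k + 1)]
      simp only [opensL, Prod.mk.injEq]
      refine ⟨by simp, ?_⟩
      congr 1
      rw [List.length_cons]
      omega

theorem rotate (r : List (List Char)) :
    ∀ k : Nat, (ind (k + r.length) ++ ['}']) :: closesL k r
      = closesL (k + 1) r ++ [ind k ++ ['}']] := by
  induction r with
  | nil => intro k; simp [closesL]
  | cons s r' ih =>
      intro k
      simp only [closesL, List.length_cons]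
      have h := ih (k + 1)
      have heq : k + (r'.length + 1) = (k + 1) + r'.length := by omega
      rw [heq, ← List.cons_append, h]

theorem fold3_eq (segs : List (List Char)) :
    ∀ (k : Nat) (acc : List (List Char)),
    segs.foldl (fun (st : List (List Char) × List Char) _ =>
      (st.1 ++ [st.2.take (st.2.length - 4) ++ ['}']], st.2.take (st.2.length - 4)))
      (acc, ind (k + segs.length))
    = (acc ++ closesL k segs, ind k) := by
  induction segs with
  | nil => intro k acc; simp [closesL]
  | cons s r ih =>
      intro k acc
      have hlen : k + (s :: r).length = (k + r.length) + 1 := by rw [List.length_cons]; omega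
      rw [List.foldl_cons, hlen]
      simp only [ind_pop]
      rw [ih k]
      simp only [closesL]
      rw [← rotate r k]
      simp

theorem wrap_eq (segs : List (List Char)) :
    ∀ (lines : List (List Char)) (k : Nat),
    (wrapRec segs lines).map (fun l => ind k ++ l)
      = opensL k segs ++ lines.map (fun l => ind (k + segs.length) ++ l) ++ closesL k segs := by
  induction segs with
  | nil => intro lines k; simp [wrapRec, opensL, closesL]
  | cons s r ih =>
      intro lines k
      simp only [wrapRec, List.map_cons, List.map_append, List.map_map]
      have hcomp : ((fun l => ind k ++ l) ∘ fun l => "    ".toList ++ l)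
          = (fun l => ind (k + 1) ++ l) := by
        funext l
        show ind k ++ ("    ".toList ++ l) = ind (k + 1) ++ l
        rw [← List.append_assoc, ind_append]
      rw [hcomp, ih lines (k + 1)]
      simp only [opensL, closesL, List.length_cons]
      have heq : k + 1 + r.length = k + (r.length + 1) := by omega
      rw [heq]
      simp

-- ===== VERDICT (by name: the statement is the Claim_ definition above) =====
theorem do_namespace_spec : Claim_equal_do_namespace := by
  intro text namespace_ _
  unfold Spec_do_namespace do_namespace do_namespace_alt
  by_cases h : namespace_ = ""
  · simp [h]
  · rw [if_neg h, if_neg h]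
    simp only []
    set segs := PySem.Chars.splitOn namespace_.toList "::".toList with hsegs
    set lines := PySem.Chars.splitlines text.toList with hlines
    have hz : ind 0 = ([] : List Char) := rfl
    have h1 := fold1_eq segs 0 []
    rw [hz] at h1
    rw [h1]
    simp only [PySem.List.foldl_append_singleton_eq_map]
    rw [fold3_eq segs 0]
    have hw := wrap_eq segs lines 0
    simp only [hz, List.nil_append, Nat.zero_add] at hw ⊢
    rw [← hw]
    simp
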